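-- pv_equiv track=rewrite | github.com/SyeonPark24/Coding-Test-Study | 프로그래머스/1/140108. 문자열 나누기/문자열 나누기.py | solution
-- ===== SOURCE A (Python) =====
-- def solution(s):
--
--     answer = 0
--     x_cnt, not_x_cnt = 0, 0
--
--     for i in range(len(s)):
--
--         if x_cnt == not_x_cnt:
--             answer +=1
--             x = s[i]
--             x_cnt, not_x_cnt = 0, 0
--
--         if s[i] ==x:
--             x_cnt +=1
--
--         else:
--             not_x_cnt +=1
--
--     return answer
-- ===== SOURCE B (Python) =====
-- def solution(s):
--     count = 0
--     while s:
--         first = s[0]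
--         bal = 0
--         cut = len(s)
--         for i, c in enumerate(s):
--             bal += 1 if c == first else -1
--             if bal == 0:
--                 cut = i + 1
--                 break
--         count += 1
--         s = s[cut:]
--     return count
-- ===== Notes on version B (the rewrite author's own statement) =====
-- stated objective: alternative
-- what changed: Replaces A's single pass with two counters and an implicit start-of-segment reset by an outer segment loop that scans for the first zero of a signed balance against the segment's first character, counts one segment, and continues on the remaining suffix.
import Mathlib
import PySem

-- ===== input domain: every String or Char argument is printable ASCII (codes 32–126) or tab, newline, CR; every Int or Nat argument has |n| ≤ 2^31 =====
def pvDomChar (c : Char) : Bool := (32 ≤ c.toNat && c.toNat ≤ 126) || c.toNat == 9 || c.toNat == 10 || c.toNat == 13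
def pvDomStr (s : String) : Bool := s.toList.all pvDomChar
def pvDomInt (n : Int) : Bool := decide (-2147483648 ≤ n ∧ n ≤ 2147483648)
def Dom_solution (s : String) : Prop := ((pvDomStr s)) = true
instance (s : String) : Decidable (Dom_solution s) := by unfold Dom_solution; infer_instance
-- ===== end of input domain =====

-- B replaces A's single loop with two counters and a start-of-segment flag by an
-- outer segment loop: scan for the first point where the signed balance against the
-- segment's first character returns to zero, count one segment, continue on the rest.
-- Same cost, a plainer decomposition (objective: alternative).

-- ===== PORT A =====
-- A's loop state: (answer, x_cnt, not_x_cnt, x).  Python's `x` is unassigned before the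
-- first iteration but the first iteration always assigns it (0 == 0), so a dummy initial
-- char is never compared; the empty string never enters the loop.
def stepA (st : Int × Int × Int × Char) (c : Char) : Int × Int × Int × Char :=
  let st' := if st.2.1 == st.2.2.1 then (st.1 + 1, (0 : Int), (0 : Int), c) else st
  if c == st'.2.2.2 then (st'.1, st'.2.1 + 1, st'.2.2.1, st'.2.2.2)
  else (st'.1, st'.2.1, st'.2.2.1 + 1, st'.2.2.2)

def solution (s : String) : Int :=
  (s.toList.foldl stepA (0, 0, 0, ' ')).1

-- ===== PORT B =====
-- the inner for-loop of Source B: running balance against `x`; returns the rest after the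
-- cut where the balance hits zero, or none if the whole string is consumed (the break
-- never fires, cut = len(s)).
def scanB (x : Char) (bal : Int) (l : List Char) : Option (List Char) :=
  match l with
  | [] => none
  | d :: ds =>
    let b := bal + (if d == x then 1 else -1)
    if b = 0 then some ds else scanB x b ds

theorem scanB_length {x : Char} {bal : Int} {l r : List Char}
    (h : scanB x bal l = some r) : r.length < l.length := by
  induction l generalizing bal with
  | nil => simp [scanB] at h
  | cons d ds ih =>
    rw [scanB] at h
    split_ifs at h <;>
      first
        | (cases h; simp)
        | exact Nat.lt_trans (ih h) (by simp)

-- the outer while-loop of Source B: count a segment, drop it, repeat.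
def goB (count : Int) (l : List Char) : Int :=
  match l with
  | [] => count
  | c :: cs =>
    match h : scanB c 0 (c :: cs) with
    | none => count + 1
    | some r => goB (count + 1) r
termination_by l.length
decreasing_by exact scanB_length h

def solution_alt (s : String) : Int := goB 0 s.toList

-- ===== PRECONDITION & SPEC =====
def Spec_solution (s : String) (out : Int) : Prop := out = solution_alt s
instance (s : String) (out : Int) : Decidable (Spec_solution s out) := by unfold Spec_solution; infer_instance

-- ===== CLAIM (what is proved, stated in full; the proofs are below) =====
def Claim_equal_solution : Prop := ∀ (s : String), Dom_solution s → Spec_solution s (solution s)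

-- ===== LEMMAS AND PROOFS =====

theorem scanB_cons (x : Char) (bal : Int) (d : Char) (ds : List Char) :
    scanB x bal (d :: ds) =
      if bal + (if d == x then 1 else -1) = 0 then some ds
      else scanB x (bal + (if d == x then 1 else -1)) ds := by
  rw [scanB]

theorem goB_cons (a : Int) (c : Char) (cs : List Char) :
    goB a (c :: cs) =
      match scanB c 1 cs with
      | none => a + 1
      | some r => goB (a + 1) r := by
  have h01 : scanB c 0 (c :: cs) = scanB c 1 cs := by
    rw [scanB_cons]; norm_num
  rw [goB]
  cases hsc : scanB c 1 cs with
  | none => rw [h01, hsc]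
  | some r => rw [h01, hsc]

-- Combined invariant, by strong induction on the list length:
-- S: from a fresh/equal-counter state, A's fold computes goB;
-- T: mid-segment (counters different), A's fold follows scanB with bal = x_cnt - not_x_cnt.
theorem foldA_invariant (n : Nat) :
    ∀ l : List Char, l.length = n →
      ((∀ (a e : Int) (x : Char), (l.foldl stepA (a, e, e, x)).1 = goB a l) ∧
       (∀ (a xc nc : Int) (x : Char), xc ≠ nc →
          (l.foldl stepA (a, xc, nc, x)).1 =
            match scanB x (xc - nc) l with
            | none => a
            | some r => goB a r)) := by
  induction n using Nat.strong_induction_on with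
  | _ n ih =>
    intro l hl
    constructor
    · intro a e x
      cases l with
      | nil => simp [goB]
      | cons c cs =>
        have hcs : (cs.foldl stepA (a + 1, 1, 0, c)).1 =
            match scanB c (1 - 0) cs with
            | none => a + 1
            | some r => goB (a + 1) r :=
          (ih cs.length (by simp [← hl]) cs rfl).2 (a + 1) 1 0 c (by norm_num)
        have hstep : stepA (a, e, e, x) c = (a + 1, 1, 0, c) := by
          simp [stepA]
        rw [List.foldl_cons, hstep, hcs, goB_cons]
        norm_num
    · intro a xc nc x hne
      cases l with
      | nil => simp [scanB]
      | cons d ds =>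
        have hstep : stepA (a, xc, nc, x) d =
            if d == x then (a, xc + 1, nc, x) else (a, xc, nc + 1, x) := by
          simp [stepA, hne]
        rw [List.foldl_cons, hstep, scanB_cons]
        by_cases hdx : d = x
        · simp only [hdx, beq_self_eq_true, if_true]
          by_cases hz : xc + 1 - nc = 0
          · have hxc : xc + 1 = nc := by omega
            rw [if_pos (by omega), hxc]
            exact (ih ds.length (by simp [← hl]) ds rfl).1 a nc x
          · rw [if_neg (by omega)]
            have := (ih ds.length (by simp [← hl]) ds rfl).2 a (xc + 1) nc x (by omega)
            rw [this, show xc - nc + 1 = xc + 1 - nc by ring]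
        · simp only [beq_iff_eq, hdx, if_false]
          by_cases hz : xc - (nc + 1) = 0
          · have hxc : xc = nc + 1 := by omega
            rw [if_pos (by omega), hxc]
            exact (ih ds.length (by simp [← hl]) ds rfl).1 a (nc + 1) x
          · rw [if_neg (by omega)]
            have := (ih ds.length (by simp [← hl]) ds rfl).2 a xc (nc + 1) x (by omega)
            rw [this, show xc - nc + -1 = xc - (nc + 1) by ring]

-- ===== VERDICT (by name: the statement is the Claim_ definition above) =====
theorem solution_spec : Claim_equal_solution := by
  intro s _
  unfold Spec_solution solution solution_alt
  exact (foldA_invariant s.toList.length s.toList rfl).1 0 0 ' '
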